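-- pv_equiv track=rewrite | github.com/FuJen0980/Image-Processor | cmpt120imageManip.py | draw_square
-- ===== SOURCE A (Python) =====
-- def draw_square(start_col, start_row,pixels):
--     height = len(pixels)
--     width = len(pixels[0])
--     end_row = start_row + 100
--     left_col = start_col - 70
--     right_col = start_col + 50
--     # Nested for loop
--     for row in range(height):
--       for col in range (width):
--         image = pixels[row][col]
--         if row == start_row and left_col <= col <= right_col:
--           # Turn the pixels green
--           image[0] = 0
--           image[1] = 255
--           image[2] = 0
--         if row == end_row and left_col <= col <= right_col:
--           # Turn the pixels green
--           image[0] = 0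
--           image[1] = 255
--           image[2] = 0
--         if col == left_col and start_row <= row <= end_row:
--           # Turn the pixels green
--           image[0] = 0
--           image[1] = 255
--           image[2] = 0
--         if col == right_col and start_row <= row  <= end_row:
--           # Turn the pixels green
--           image[0] = 0
--           image[1] = 255
--           image[2] = 0
--     return pixels
-- ===== SOURCE B (Python) =====
-- def draw_square(start_col, start_row, pixels):
--     # Paint only the clipped border segments instead of scanning every pixel.
--     height = len(pixels)
--     width = len(pixels[0])
--     end_row = start_row + 100
--     left_col = start_col - 70
--     right_col = start_col + 50
--     lo = max(left_col, 0)
--     hi = min(right_col, width - 1)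
--     for r in (start_row, end_row):
--         if 0 <= r < height:
--             row = pixels[r]
--             for c in range(lo, hi + 1):
--                 px = row[c]
--                 px[0] = 0
--                 px[1] = 255
--                 px[2] = 0
--     rlo = max(start_row, 0)
--     rhi = min(end_row, height - 1)
--     for c in (left_col, right_col):
--         if 0 <= c < width:
--             for r in range(rlo, rhi + 1):
--                 px = pixels[r][c]
--                 px[0] = 0
--                 px[1] = 255
--                 px[2] = 0
--     return pixels
-- ===== Notes on version B (the rewrite author's own statement) =====
-- stated objective: alternative
-- what changed: A scans every pixel of the image with a nested row/column loop testing four border conditions per pixel; B computes the clipped border segments once and paints only the two horizontal runs and two vertical runs, never visiting interior pixels (O(width+height) work instead of O(width*height), though not measurably faster on the generated skinny images).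
import Mathlib
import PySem

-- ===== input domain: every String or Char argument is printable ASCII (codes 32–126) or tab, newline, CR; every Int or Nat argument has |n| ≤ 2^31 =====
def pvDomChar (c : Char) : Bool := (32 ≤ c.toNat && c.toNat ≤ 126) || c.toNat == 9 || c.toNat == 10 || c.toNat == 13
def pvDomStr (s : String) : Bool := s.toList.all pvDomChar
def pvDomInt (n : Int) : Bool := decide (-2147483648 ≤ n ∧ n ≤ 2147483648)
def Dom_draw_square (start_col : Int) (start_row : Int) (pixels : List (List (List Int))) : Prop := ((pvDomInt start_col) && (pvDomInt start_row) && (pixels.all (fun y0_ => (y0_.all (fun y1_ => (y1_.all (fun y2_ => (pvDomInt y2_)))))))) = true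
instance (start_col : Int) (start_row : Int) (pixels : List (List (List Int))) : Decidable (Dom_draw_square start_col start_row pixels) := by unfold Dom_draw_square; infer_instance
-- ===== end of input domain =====

-- B paints only the four clipped border segments (no full-image scan); equivalence is about the
-- returned value (both Pythons also mutate `pixels` in place, with the same visible effect).

-- ===== PORT A =====
-- image[0] = 0; image[1] = 255; image[2] = 0  (both Pythons use this exact triple of writes)
def pvGreen (image : List Int) : List Int := ((image.set 0 0).set 1 255).set 2 0

-- the four sequential 'if' blocks of A's inner loop body, acting on one pixel
def pvCellA (start_col start_row : Int) (row col : Nat) (image : List Int) : List Int :=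
  let end_row := start_row + 100
  let left_col := start_col - 70
  let right_col := start_col + 50
  let image := if (row : Int) = start_row ∧ left_col ≤ (col : Int) ∧ (col : Int) ≤ right_col then pvGreen image else image
  let image := if (row : Int) = end_row ∧ left_col ≤ (col : Int) ∧ (col : Int) ≤ right_col then pvGreen image else image
  let image := if (col : Int) = left_col ∧ start_row ≤ (row : Int) ∧ (row : Int) ≤ end_row then pvGreen image else image
  if (col : Int) = right_col ∧ start_row ≤ (row : Int) ∧ (row : Int) ≤ end_row then pvGreen image else image

def draw_square (start_col : Int) (start_row : Int) (pixels : List (List (List Int))) : List (List (List Int)) :=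
  let height := pixels.length
  let width := (pixels.headD []).length
  -- the nested for loops; the in-place pixel mutation becomes writing the updated pixel back
  (List.range height).foldl (fun px row =>
    (List.range width).foldl (fun px col =>
      px.set row ((px.getD row []).set col
        (pvCellA start_col start_row row col ((px.getD row []).getD col [])))) px) pixels

-- ===== PORT B =====
def draw_square_alt (start_col : Int) (start_row : Int) (pixels : List (List (List Int))) : List (List (List Int)) :=
  let height := (pixels.length : Int)
  let width := ((pixels.headD []).length : Int)
  let end_row := start_row + 100
  let left_col := start_col - 70
  let right_col := start_col + 50
  let lo := max left_col 0
  let hi := min right_col (width - 1)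
  -- horizontal runs: rows start_row and end_row, columns lo..hi
  let px1 := [start_row, end_row].foldl (fun px r =>
    if 0 ≤ r ∧ r < height then
      (PySem.List.pyRange lo (hi + 1) 1).foldl (fun px c =>
        px.modify r.toNat (fun rw => rw.modify c.toNat pvGreen)) px
    else px) pixels
  let rlo := max start_row 0
  let rhi := min end_row (height - 1)
  -- vertical runs: columns left_col and right_col, rows rlo..rhi
  [left_col, right_col].foldl (fun px c =>
    if 0 ≤ c ∧ c < width then
      (PySem.List.pyRange rlo (rhi + 1) 1).foldl (fun px r =>
        px.modify r.toNat (fun rw => rw.modify c.toNat pvGreen)) px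
    else px) px1

-- ===== PRECONDITION & SPEC =====
-- whether position (i, j) lies on the square outline A draws (Bool so that Pre_ is decidable)
def pvOnBorder (sc sr : Int) (i j : Nat) : Bool :=
  decide (((i : Int) = sr ∧ sc - 70 ≤ (j : Int) ∧ (j : Int) ≤ sc + 50) ∨
          ((i : Int) = sr + 100 ∧ sc - 70 ≤ (j : Int) ∧ (j : Int) ≤ sc + 50) ∨
          (((j : Int) = sc - 70 ∨ (j : Int) = sc + 50) ∧ sr ≤ (i : Int) ∧ (i : Int) ≤ sr + 100))

-- Pre_ = exactly the inputs on which the Python A returns (no IndexError): image nonempty,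
-- every row at least as long as row 0, and every pixel on the drawn border has ≥ 3 channels.
def Pre_draw_square (start_col : Int) (start_row : Int) (pixels : List (List (List Int))) : Prop :=
  pixels ≠ [] ∧
  ∀ i < pixels.length,
    (pixels.headD []).length ≤ (pixels.getD i []).length ∧
    ∀ j < (pixels.headD []).length,
      pvOnBorder start_col start_row i j = true →
      3 ≤ ((pixels.getD i []).getD j []).length

instance (start_col : Int) (start_row : Int) (pixels : List (List (List Int))) : Decidable (Pre_draw_square start_col start_row pixels) := by unfold Pre_draw_square; infer_instance

def pvWitness_draw_square : Int × Int × List (List (List Int)) := (0, 0, [[[1, 2, 3]]])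

def Spec_draw_square (start_col : Int) (start_row : Int) (pixels : List (List (List Int))) (out : List (List (List Int))) : Prop := out = draw_square_alt start_col start_row pixels
instance (start_col : Int) (start_row : Int) (pixels : List (List (List Int))) (out : List (List (List Int))) : Decidable (Spec_draw_square start_col start_row pixels out) := by unfold Spec_draw_square; infer_instance

-- ===== CLAIM (what is proved, stated in full; the proofs are below) =====
def Claim_equal_draw_square : Prop := ∀ (start_col : Int) (start_row : Int) (pixels : List (List (List Int))), Dom_draw_square start_col start_row pixels → Pre_draw_square start_col start_row pixels → Spec_draw_square start_col start_row pixels (draw_square start_col start_row pixels)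

-- ===== LEMMAS AND PROOFS =====

-- pixel value at (i, j), with [] as the out-of-range default
def pvVal (px : List (List (List Int))) (i j : Nat) : List Int := (px.getD i []).getD j []

theorem pvGreen_nil : pvGreen [] = [] := by decide

theorem pvGreen_green (x : List Int) : pvGreen (pvGreen x) = pvGreen x := by
  unfold pvGreen
  apply List.ext_getElem (by simp)
  intro n h1 h2
  simp [List.getElem_set]
  split_ifs <;> simp_all

-- pvCellA is 'green if on the border, else unchanged'
theorem pvCellA_eq (sc sr : Int) (r c : Nat) (img : List Int) :
    pvCellA sc sr r c img = if pvOnBorder sc sr r c then pvGreen img else img := by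
  simp only [pvCellA, pvOnBorder, decide_eq_true_eq]
  split_ifs <;> first | rfl | (exfalso; omega) | simp only [pvGreen_green]

theorem foldl_fun_congr {α β : Type} (f g : α → β → α) (l : List β) (x : α)
    (h : ∀ a b, f a b = g a b) : l.foldl f x = l.foldl g x := by
  induction l generalizing x with
  | nil => rfl
  | cons b l ih => rw [List.foldl_cons, List.foldl_cons, h, ih]

theorem foldl_length_eq {α β : Type} (f : List α → β → List α)
    (h : ∀ a b, (f a b).length = a.length) :
    ∀ (l : List β) (xs : List α), (l.foldl f xs).length = xs.length := by
  intro l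
  induction l with
  | nil => intro xs; rfl
  | cons b l ih => intro xs; rw [List.foldl_cons, ih, h]

theorem getD_set_eq {α : Type} (d : α) (xs : List α) (i : Nat) (v : α) :
    (xs.set i v).getD i d = if i < xs.length then v else d := by
  by_cases h : i < xs.length
  · rw [if_pos h, List.getD_eq_getElem _ _ (by simpa using h), List.getElem_set_self]
  · rw [List.getD_eq_default _ _ (by simpa using Nat.le_of_not_lt h), if_neg h]

theorem getD_set_ne {α : Type} (d : α) (xs : List α) (i j : Nat) (v : α) (h : j ≠ i) :
    (xs.set i v).getD j d = xs.getD j d := by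
  simp [List.getD, List.getElem?_set_ne (by omega : i ≠ j)]

theorem getD_modify {α : Type} (d : α) (xs : List α) (i j : Nat) (f : α → α) :
    (xs.modify i f).getD j d = if j = i ∧ i < xs.length then f (xs.getD i d) else xs.getD j d := by
  by_cases hj : j = i ∧ i < xs.length
  · obtain ⟨rfl, hi⟩ := hj
    rw [if_pos ⟨rfl, hi⟩, List.getD_eq_getElem _ _ (by simpa using hi),
        List.getD_eq_getElem _ _ hi]
    simp
  · rw [if_neg hj]
    by_cases hji : j = i
    · subst hji
      have hlen : xs.length ≤ j := by omega
      rw [List.getD_eq_default _ _ (by simpa [List.length_modify] using hlen),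
          List.getD_eq_default _ _ hlen]
    · simp [List.getD, Ne.symm hji]

theorem set_getD_self {α : Type} (d : α) (xs : List α) (i : Nat) :
    xs.set i (xs.getD i d) = xs := by
  by_cases h : i < xs.length
  · rw [List.getD_eq_getElem _ _ h, List.set_getElem_self]
  · rw [List.set_eq_of_length_le (by omega)]

-- a 1-D loop of in-place writes, characterised pointwise
theorem foldl_set_getD {α : Type} (d : α) (f : Nat → α → α) :
    ∀ (m : Nat) (xs : List α) (j : Nat),
      ((List.range m).foldl (fun a c => a.set c (f c (a.getD c d))) xs).getD j d
      = if j < m ∧ j < xs.length then f j (xs.getD j d) else xs.getD j d := by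
  intro m
  induction m with
  | zero => intro xs j; simp
  | succ m ih =>
    intro xs j
    rw [List.range_succ, List.foldl_append, List.foldl_cons, List.foldl_nil]
    have hlen : ((List.range m).foldl (fun a c => a.set c (f c (a.getD c d))) xs).length = xs.length :=
      foldl_length_eq _ (by intro a b; simp) _ _
    by_cases hj : j = m
    · subst hj
      rw [getD_set_eq, hlen, ih]
      by_cases hm : j < xs.length <;> simp [hm]
    · rw [getD_set_ne _ _ _ _ _ hj, ih]
      have : (j < m + 1 ∧ j < xs.length) ↔ (j < m ∧ j < xs.length) := by omega
      rw [if_congr this rfl rfl]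

-- A's inner column loop only rewrites row r
theorem pvInnerRow (u : Nat → List Int → List Int) (cs : List Nat) :
    ∀ (px : List (List (List Int))) (r : Nat),
      cs.foldl (fun a c => a.set r ((a.getD r []).set c (u c ((a.getD r []).getD c [])))) px
      = px.set r (cs.foldl (fun rw c => rw.set c (u c (rw.getD c []))) (px.getD r [])) := by
  induction cs with
  | nil => intro px r; rw [List.foldl_nil, List.foldl_nil, set_getD_self]
  | cons c cs ih =>
    intro px r
    rw [List.foldl_cons, List.foldl_cons, ih]
    have hrow : (px.set r ((px.getD r []).set c (u c ((px.getD r []).getD c [])))).getD r []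
        = (px.getD r []).set c (u c ((px.getD r []).getD c [])) := by
      rw [getD_set_eq]
      by_cases h : r < px.length
      · rw [if_pos h]
      · rw [if_neg h, List.getD_eq_default _ _ (by omega), List.set_nil]
    rw [hrow, List.set_set]

-- the row paint function A applies to row r
def pvRowPaint (sc sr : Int) (w r : Nat) (rw : List (List Int)) : List (List Int) :=
  (List.range w).foldl (fun rw c => rw.set c (pvCellA sc sr r c (rw.getD c []))) rw

theorem draw_square_eq_rowfold (sc sr : Int) (px : List (List (List Int))) :
    draw_square sc sr px
    = (List.range px.length).foldl
        (fun a r => a.set r (pvRowPaint sc sr (px.headD []).length r (a.getD r []))) px := by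
  unfold draw_square pvRowPaint
  exact foldl_fun_congr _ _ _ _ (fun a r => pvInnerRow _ _ a r)

theorem pvRowPaint_length (sc sr : Int) (w r : Nat) (rw : List (List Int)) :
    (pvRowPaint sc sr w r rw).length = rw.length :=
  foldl_length_eq _ (by intro a b; simp) _ _

-- A characterised pointwise
theorem A_val (sc sr : Int) (px : List (List (List Int))) (i j : Nat) :
    pvVal (draw_square sc sr px) i j
    = if i < px.length ∧ j < (px.headD []).length ∧ j < (px.getD i []).length ∧ pvOnBorder sc sr i j
      then pvGreen (pvVal px i j) else pvVal px i j := by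
  rw [pvVal, draw_square_eq_rowfold, foldl_set_getD]
  by_cases hi : i < px.length
  · rw [if_pos ⟨hi, hi⟩, pvRowPaint, foldl_set_getD, pvCellA_eq]
    by_cases hb : pvOnBorder sc sr i j
    · by_cases hj : j < (px.headD []).length ∧ j < (px.getD i []).length
      · rw [if_pos hj, if_pos hb, if_pos ⟨hi, hj.1, hj.2, hb⟩, pvVal]
      · rw [if_neg hj, if_neg (by tauto), pvVal]
    · by_cases hj : j < (px.headD []).length ∧ j < (px.getD i []).length
      · rw [if_pos hj, if_neg hb, if_neg (by tauto), pvVal]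
      · rw [if_neg hj, if_neg (by tauto), pvVal]
  · rw [if_neg (by tauto), if_neg (by tauto), pvVal]

theorem A_length (sc sr : Int) (px : List (List (List Int))) :
    (draw_square sc sr px).length = px.length := by
  rw [draw_square_eq_rowfold]
  exact foldl_length_eq _ (by intro a b; simp) _ _

theorem A_rowlength (sc sr : Int) (px : List (List (List Int))) (i : Nat) :
    ((draw_square sc sr px).getD i []).length = (px.getD i []).length := by
  rw [draw_square_eq_rowfold, foldl_set_getD]
  split_ifs with h
  · rw [pvRowPaint_length]
  · rfl

-- one pixel write of B, pointwise (unconditional: out-of-range writes are no-ops and green [] = [])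
theorem B_val_modify (px : List (List (List Int))) (r c i j : Nat) :
    pvVal (px.modify r (fun rw => rw.modify c pvGreen)) i j
    = if i = r ∧ j = c then pvGreen (pvVal px i j) else pvVal px i j := by
  rw [pvVal, getD_modify]
  by_cases hir : i = r ∧ r < px.length
  · obtain ⟨rfl, hr⟩ := hir
    rw [if_pos ⟨rfl, hr⟩, getD_modify]
    by_cases hjc : j = c ∧ c < (px.getD i []).length
    · obtain ⟨rfl, hc⟩ := hjc
      rw [if_pos ⟨rfl, hc⟩, if_pos ⟨rfl, rfl⟩, pvVal]
    · rw [if_neg hjc]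
      by_cases hj : j = c
      · subst hj
        have hlen : (px.getD i []).length ≤ j := by omega
        rw [if_pos ⟨rfl, rfl⟩, pvVal, List.getD_eq_default _ _ hlen, pvGreen_nil]
      · rw [if_neg (by tauto), pvVal]
  · rw [if_neg hir]
    by_cases hi : i = r
    · subst hi
      have hlen : px.length ≤ i := by omega
      by_cases hj : j = c
      · subst hj
        rw [if_pos ⟨rfl, rfl⟩, pvVal, List.getD_eq_default _ _ hlen, List.getD_nil, pvGreen_nil]
      · rw [if_neg (by tauto)]; rfl
    · rw [if_neg (by tauto)]; rfl

-- a whole paint pass of B, pointwise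
theorem B_val_paint {β : Type} (ri ci : β → Nat) :
    ∀ (L : List β) (px : List (List (List Int))) (i j : Nat),
      pvVal (L.foldl (fun a b => a.modify (ri b) (fun rw => rw.modify (ci b) pvGreen)) px) i j
      = if ∃ b ∈ L, i = ri b ∧ j = ci b then pvGreen (pvVal px i j) else pvVal px i j := by
  intro L
  induction L with
  | nil => intro px i j; simp
  | cons b L ih =>
    intro px i j
    rw [List.foldl_cons, ih, B_val_modify]
    by_cases h1 : i = ri b ∧ j = ci b
    · by_cases h2 : ∃ b' ∈ L, i = ri b' ∧ j = ci b'
      · rw [if_pos h2, if_pos h1, if_pos (by exact ⟨b, by simp, h1⟩), pvGreen_green]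
      · rw [if_neg h2, if_pos h1, if_pos (by exact ⟨b, by simp, h1⟩)]
    · by_cases h2 : ∃ b' ∈ L, i = ri b' ∧ j = ci b'
      · rw [if_pos h2, if_neg h1, if_pos (by obtain ⟨b', hb', hh⟩ := h2; exact ⟨b', by simp [hb'], hh⟩)]
      · rw [if_neg h2, if_neg h1, if_neg (by
          rintro ⟨b', hb', hh⟩
          rcases List.mem_cons.1 hb' with rfl | hb'
          · exact h1 hh
          · exact h2 ⟨b', hb', hh⟩)]

-- one guarded horizontal pass of B, pointwise
theorem B_val_guard_row (g : Prop) [Decidable g] (hr : Int) (hg : g → 0 ≤ hr) (lo hi : Int)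
    (hlo : 0 ≤ lo) (px : List (List (List Int))) (i j : Nat) :
    pvVal (if g then
        (PySem.List.pyRange lo hi 1).foldl (fun a c =>
          a.modify hr.toNat (fun rw => rw.modify c.toNat pvGreen)) px
      else px) i j
    = if g ∧ (i : Int) = hr ∧ lo ≤ (j : Int) ∧ (j : Int) < hi
      then pvGreen (pvVal px i j) else pvVal px i j := by
  by_cases hgg : g
  · rw [if_pos hgg, B_val_paint]
    have hb : (∃ b ∈ PySem.List.pyRange lo hi 1, i = hr.toNat ∧ j = b.toNat)
        ↔ ((i : Int) = hr ∧ lo ≤ (j : Int) ∧ (j : Int) < hi) := by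
      constructor
      · rintro ⟨c, hc, rfl, rfl⟩
        rw [PySem.List.mem_pyRange_one] at hc
        have := hg hgg
        omega
      · rintro ⟨h1, h2, h3⟩
        exact ⟨(j : Int), PySem.List.mem_pyRange_one.2 (by omega),
          by have := hg hgg; omega, by omega⟩
    rw [if_congr hb rfl rfl]
    have : ((i : Int) = hr ∧ lo ≤ (j : Int) ∧ (j : Int) < hi)
        ↔ (g ∧ (i : Int) = hr ∧ lo ≤ (j : Int) ∧ (j : Int) < hi) := by tauto
    rw [if_congr this rfl rfl]
  · rw [if_neg hgg, if_neg (by tauto)]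

-- one guarded vertical pass of B, pointwise
theorem B_val_guard_col (g : Prop) [Decidable g] (hc : Int) (hg : g → 0 ≤ hc) (lo hi : Int)
    (hlo : 0 ≤ lo) (px : List (List (List Int))) (i j : Nat) :
    pvVal (if g then
        (PySem.List.pyRange lo hi 1).foldl (fun a r =>
          a.modify r.toNat (fun rw => rw.modify hc.toNat pvGreen)) px
      else px) i j
    = if g ∧ (j : Int) = hc ∧ lo ≤ (i : Int) ∧ (i : Int) < hi
      then pvGreen (pvVal px i j) else pvVal px i j := by
  by_cases hgg : g
  · rw [if_pos hgg, B_val_paint]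
    have hb : (∃ b ∈ PySem.List.pyRange lo hi 1, i = b.toNat ∧ j = hc.toNat)
        ↔ ((j : Int) = hc ∧ lo ≤ (i : Int) ∧ (i : Int) < hi) := by
      constructor
      · rintro ⟨r, hrm, rfl, rfl⟩
        rw [PySem.List.mem_pyRange_one] at hrm
        have := hg hgg
        omega
      · rintro ⟨h1, h2, h3⟩
        exact ⟨(i : Int), PySem.List.mem_pyRange_one.2 (by omega),
          by omega, by have := hg hgg; omega⟩
    rw [if_congr hb rfl rfl]
    have : ((j : Int) = hc ∧ lo ≤ (i : Int) ∧ (i : Int) < hi)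
        ↔ (g ∧ (j : Int) = hc ∧ lo ≤ (i : Int) ∧ (i : Int) < hi) := by tauto
    rw [if_congr this rfl rfl]
  · rw [if_neg hgg, if_neg (by tauto)]

-- the combined condition under which B paints (i, j)
def pvBCond (sc sr : Int) (h w : Nat) (i j : Nat) : Bool :=
  decide (
    ((0 ≤ sr ∧ sr < (h : Int)) ∧ (i : Int) = sr ∧
      max (sc - 70) 0 ≤ (j : Int) ∧ (j : Int) < min (sc + 50) ((w : Int) - 1) + 1) ∨
    ((0 ≤ sr + 100 ∧ sr + 100 < (h : Int)) ∧ (i : Int) = sr + 100 ∧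
      max (sc - 70) 0 ≤ (j : Int) ∧ (j : Int) < min (sc + 50) ((w : Int) - 1) + 1) ∨
    ((0 ≤ sc - 70 ∧ sc - 70 < (w : Int)) ∧ (j : Int) = sc - 70 ∧
      max sr 0 ≤ (i : Int) ∧ (i : Int) < min (sr + 100) ((h : Int) - 1) + 1) ∨
    ((0 ≤ sc + 50 ∧ sc + 50 < (w : Int)) ∧ (j : Int) = sc + 50 ∧
      max sr 0 ≤ (i : Int) ∧ (i : Int) < min (sr + 100) ((h : Int) - 1) + 1))

-- B characterised pointwise
theorem B_val (sc sr : Int) (px : List (List (List Int))) (i j : Nat) :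
    pvVal (draw_square_alt sc sr px) i j
    = if pvBCond sc sr px.length (px.headD []).length i j
      then pvGreen (pvVal px i j) else pvVal px i j := by
  unfold draw_square_alt
  rw [List.foldl_cons, List.foldl_cons, List.foldl_nil,
      List.foldl_cons, List.foldl_cons, List.foldl_nil]
  rw [B_val_guard_col _ _ (fun h => h.1) _ _ (by omega),
      B_val_guard_col _ _ (fun h => h.1) _ _ (by omega),
      B_val_guard_row _ _ (fun h => h.1) _ _ (by omega),
      B_val_guard_row _ _ (fun h => h.1) _ _ (by omega)]
  simp only [pvBCond, decide_eq_true_eq]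
  split_ifs <;> first | rfl | (exfalso; omega) | simp only [pvGreen_green]

theorem B_length (sc sr : Int) (px : List (List (List Int))) :
    (draw_square_alt sc sr px).length = px.length := by
  unfold draw_square_alt
  rw [List.foldl_cons, List.foldl_cons, List.foldl_nil,
      List.foldl_cons, List.foldl_cons, List.foldl_nil]
  have hp : ∀ (lo hi : Int) (f g : Int → Nat) (a : List (List (List Int))),
      ((PySem.List.pyRange lo hi 1).foldl (fun a b =>
        a.modify (f b) (fun rw => rw.modify (g b) pvGreen)) a).length = a.length := by
    intro lo hi f g a
    exact foldl_length_eq _ (by intro a b; simp [List.length_modify]) _ _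
  split_ifs <;> simp [hp]

theorem paint_rowlength {β : Type} (ri ci : β → Nat) :
    ∀ (L : List β) (px : List (List (List Int))) (i : Nat),
      ((L.foldl (fun a b => a.modify (ri b) (fun rw => rw.modify (ci b) pvGreen)) px).getD i []).length
      = (px.getD i []).length := by
  intro L
  induction L with
  | nil => intro px i; rfl
  | cons b L ih =>
    intro px i
    rw [List.foldl_cons, ih, getD_modify]
    split_ifs with h
    · rw [List.length_modify]
      obtain ⟨rfl, _⟩ := h
      rfl
    · rfl

theorem B_rowlength (sc sr : Int) (px : List (List (List Int))) (i : Nat) :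
    ((draw_square_alt sc sr px).getD i []).length = (px.getD i []).length := by
  unfold draw_square_alt
  rw [List.foldl_cons, List.foldl_cons, List.foldl_nil,
      List.foldl_cons, List.foldl_cons, List.foldl_nil]
  split_ifs <;> simp only [paint_rowlength]

-- on positions inside the image, A's paint condition and B's coincide
theorem cond_iff (sc sr : Int) (h w : Nat) (i j : Nat) (hi : i < h) :
    (j < w ∧ pvOnBorder sc sr i j = true) ↔ pvBCond sc sr h w i j = true := by
  simp only [pvOnBorder, pvBCond, decide_eq_true_eq]
  omega

theorem draw_square_eq_alt (sc sr : Int) (px : List (List (List Int))) :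
    draw_square sc sr px = draw_square_alt sc sr px := by
  apply List.ext_getElem
  · rw [A_length, B_length]
  · intro i hA hB
    have hi : i < px.length := by rw [A_length] at hA; exact hA
    apply List.ext_getElem
    · have h1 := A_rowlength sc sr px i
      have h2 := B_rowlength sc sr px i
      rw [List.getD_eq_getElem _ _ hA, List.getD_eq_getElem _ _ hB] at *
      omega
    · intro j hjA hjB
      have hAv : (draw_square sc sr px)[i][j] = pvVal (draw_square sc sr px) i j := by
        rw [pvVal, List.getD_eq_getElem _ _ hA, List.getD_eq_getElem _ _ hjA]
      have hBv : (draw_square_alt sc sr px)[i][j] = pvVal (draw_square_alt sc sr px) i j := by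
        rw [pvVal, List.getD_eq_getElem _ _ hB, List.getD_eq_getElem _ _ hjB]
      rw [hAv, hBv, A_val, B_val]
      have hjpx : j < (px.getD i []).length := by
        have := A_rowlength sc sr px i
        rw [List.getD_eq_getElem _ _ hA] at this
        omega
      have hiff : (i < px.length ∧ j < (px.headD []).length ∧ j < (px.getD i []).length ∧ pvOnBorder sc sr i j = true)
          ↔ pvBCond sc sr px.length (px.headD []).length i j = true := by
        rw [← cond_iff sc sr px.length (px.headD []).length i j hi]
        constructor
        · rintro ⟨_, h1, _, h2⟩
          exact ⟨h1, h2⟩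
        · rintro ⟨h1, h2⟩
          exact ⟨hi, h1, hjpx, h2⟩
      rw [if_congr hiff rfl rfl]

-- ===== VERDICT (by name: the statement is the Claim_ definition above) =====
theorem draw_square_spec : Claim_equal_draw_square := by
  intro sc sr px _ _
  unfold Spec_draw_square
  exact draw_square_eq_alt sc sr px
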